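-- pv_equiv track=rewrite | github.com/UniversitaDellaCalabria/IdM | scripts/unildap_utils.py | get_duplicates_by_attribute
-- ===== SOURCE A (Python) =====
-- def get_duplicates_by_attribute(entries, attribute):
--     unique_codes = dict()
--     duplicates = dict()
--     for i in entries:
--         dn = i[0]
--         ucodes = i[1].get(attribute)
--         if not ucodes: continue
--         for ucode in ucodes:
--             ucode = ucode.lower()
--             if ucode not in unique_codes.keys():
--                 unique_codes[ucode] = dn
--             else:
--                 if duplicates.get(ucode):
--                     values = duplicates[ucode]
--                 else:
--                     values = [unique_codes[ucode]]
--                 values.append(dn)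
--                 duplicates[ucode] = values
--     return duplicates
-- ===== SOURCE B (Python) =====
-- def get_duplicates_by_attribute(entries, attribute):
--     all_codes = {}
--     for dn, attrs in entries:
--         for ucode in attrs.get(attribute) or []:
--             all_codes.setdefault(ucode.lower(), []).append(dn)
--     return {k: v for k, v in all_codes.items() if len(v) > 1}
-- ===== Notes on version B (the rewrite author's own statement) =====
-- stated objective: simpler
-- what changed: Replaces A's online two-dict promotion (unique_codes/duplicates with in-place list mutation) by a group-then-filter decomposition: one dict mapping each lowercased code to all its dns, then keep the groups of size > 1; Pre_ excludes inputs where two or more duplicated codes have their second occurrences ordered differently from their first occurrences, on which A's key order (second occurrence) and B's (first occurrence) are both accidental dict-insertion orders of the same dict.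
import Mathlib
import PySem

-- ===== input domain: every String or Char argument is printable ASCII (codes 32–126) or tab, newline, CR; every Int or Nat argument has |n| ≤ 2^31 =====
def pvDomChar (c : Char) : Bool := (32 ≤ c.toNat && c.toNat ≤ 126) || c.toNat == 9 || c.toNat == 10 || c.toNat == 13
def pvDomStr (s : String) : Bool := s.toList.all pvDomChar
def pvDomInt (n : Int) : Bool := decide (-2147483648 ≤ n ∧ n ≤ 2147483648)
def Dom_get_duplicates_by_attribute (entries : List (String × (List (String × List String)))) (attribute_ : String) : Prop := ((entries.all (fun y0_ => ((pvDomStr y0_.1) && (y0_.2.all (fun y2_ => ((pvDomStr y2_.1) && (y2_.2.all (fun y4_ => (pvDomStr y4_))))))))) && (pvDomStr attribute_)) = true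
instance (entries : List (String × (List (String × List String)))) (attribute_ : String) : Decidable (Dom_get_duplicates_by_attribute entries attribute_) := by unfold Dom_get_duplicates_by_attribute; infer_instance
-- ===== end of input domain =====

-- B groups all dns by lowercased code in one dict and keeps the groups of size > 1 (simpler
-- decomposition, not faster); proved equal to A on Pre_ (where the two dicts' key orders agree).

-- ===== PORT A =====
-- literal transliteration of A: one pass over entries, inner loop over the attribute's
-- values, promoting a code from unique_codes to duplicates on its second appearance.
def get_duplicates_by_attribute (entries : List (String × (List (String × List String)))) (attribute_ : String) : List (String × List String) :=
  (entries.foldl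
    (fun (st : PySem.Dict String String × PySem.Dict String (List String)) i =>
      match PySem.Dict.get? (PySem.Dict.mk i.2) attribute_ with
      | none => st                                   -- ucodes is None: falsy, continue
      | some ucodes =>
        if ucodes = [] then st                       -- ucodes == []: falsy, continue
        else ucodes.foldl
          (fun st ucode0 =>
            let ucode := PySem.Str.lower ucode0
            match PySem.Dict.get? st.1 ucode with
            | none => (st.1.insert ucode i.1, st.2)  -- ucode not in unique_codes
            | some first =>
              let values :=
                match PySem.Dict.get? st.2 ucode with
                | some v => if v = [] then [first] else v   -- 'if duplicates.get(ucode):' truthiness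
                | none => [first]
              (st.1, st.2.insert ucode (values ++ [i.1]))) st)
    (PySem.Dict.empty, PySem.Dict.empty)).2.items

-- ===== PORT B =====
-- all_codes = {}; for dn, attrs in entries: for ucode in attrs.get(attribute) or []:
--     all_codes.setdefault(ucode.lower(), []).append(dn)        (= modify k [] (· ++ [dn]))
-- return {k: v for k, v in all_codes.items() if len(v) > 1}
def get_duplicates_by_attribute_alt (entries : List (String × (List (String × List String)))) (attribute_ : String) : List (String × List String) :=
  ((entries.foldl
      (fun (d : PySem.Dict String (List String)) i =>
        ((PySem.Dict.get? (PySem.Dict.mk i.2) attribute_).getD []).foldl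
          (fun d u => d.modify (PySem.Str.lower u) [] (fun v => v ++ [i.1])) d)
      PySem.Dict.empty).items).filter (fun kv => decide (1 < kv.2.length))

-- ===== PRECONDITION & SPEC =====
-- the flattened list of lowercased attribute values, in entry order
def pvPreKeys (entries : List (String × (List (String × List String)))) (attribute_ : String) : List String :=
  entries.flatMap (fun i => ((PySem.Dict.get? (PySem.Dict.mk i.2) attribute_).getD []).map PySem.Str.lower)

-- the codes reaching their SECOND occurrence, in the order of those second occurrences
def pvSecondOrder (keys : List String) : List String :=
  ((PySem.List.enumerate keys 0).filter
      (fun ju => PySem.List.count (PySem.List.slice keys none (some (ju.1 + 1))) ju.2 == 2)).map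
    (fun ju => ju.2)

-- Pre_ excludes inputs where two or more duplicated codes have their second occurrences ordered
-- differently from their first occurrences: there A's result dict (keyed at second occurrences) and
-- B's (keyed at first occurrences) are the same dict in two accidental insertion orders.
def Pre_get_duplicates_by_attribute (entries : List (String × (List (String × List String)))) (attribute_ : String) : Prop :=
  ((PySem.Set.ofList (pvPreKeys entries attribute_)).filter
      (fun u => decide (2 ≤ (pvPreKeys entries attribute_).count u)))
    = pvSecondOrder (pvPreKeys entries attribute_)
instance (entries : List (String × (List (String × List String)))) (attribute_ : String) : Decidable (Pre_get_duplicates_by_attribute entries attribute_) := by unfold Pre_get_duplicates_by_attribute; infer_instance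

def pvWitness_get_duplicates_by_attribute : (List (String × (List (String × List String)))) × String :=
  ([("d1", [("x", ["A"])]), ("d2", [("x", ["a"])]), ("d3", [("x", ["b"])])], "x")

def Spec_get_duplicates_by_attribute (entries : List (String × (List (String × List String)))) (attribute_ : String) (out : List (String × List String)) : Prop := out = get_duplicates_by_attribute_alt entries attribute_
instance (entries : List (String × (List (String × List String)))) (attribute_ : String) (out : List (String × List String)) : Decidable (Spec_get_duplicates_by_attribute entries attribute_ out) := by unfold Spec_get_duplicates_by_attribute; infer_instance

-- ===== CLAIM (what is proved, stated in full; the proofs are below) =====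
def Claim_equal_get_duplicates_by_attribute : Prop := ∀ (entries : List (String × (List (String × List String)))) (attribute_ : String), Dom_get_duplicates_by_attribute entries attribute_ → Pre_get_duplicates_by_attribute entries attribute_ → Spec_get_duplicates_by_attribute entries attribute_ (get_duplicates_by_attribute entries attribute_)

-- ===== LEMMAS AND PROOFS =====

-- the flattened (lowered code, dn) occurrence list both programs effectively traverse
def pvOcc (entries : List (String × (List (String × List String)))) (attribute_ : String) : List (String × String) :=
  entries.flatMap (fun i =>
    ((PySem.Dict.get? (PySem.Dict.mk i.2) attribute_).getD []).map (fun u => (PySem.Str.lower u, i.1)))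

-- dns l u : the dns of all occurrences of code u in the occurrence list l (in order)
def pvDns (l : List (String × String)) (u : String) : List String :=
  (l.filter (fun q => q.1 == u)).map Prod.snd

-- cnt l u : how many times code u occurs in l
def pvCnt (l : List (String × String)) (u : String) : Nat :=
  (l.map Prod.fst).count u

-- A's result as a function of the occurrence list: one entry per code at its second occurrence
def pvDups (occ : List (String × String)) : List (String × List String) :=
  (pvSecondOrder (occ.map Prod.fst)).map (fun u => (u, pvDns occ u))

-- the step of A's inner loop, on one (lowered code, dn) occurrence
def pvStep (st : PySem.Dict String String × PySem.Dict String (List String)) (q : String × String) :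
    PySem.Dict String String × PySem.Dict String (List String) :=
  match PySem.Dict.get? st.1 q.1 with
  | none => (st.1.insert q.1 q.2, st.2)
  | some first =>
    let values :=
      match PySem.Dict.get? st.2 q.1 with
      | some v => if v = [] then [first] else v
      | none => [first]
    (st.1, st.2.insert q.1 (values ++ [q.2]))

theorem pvKeys_occ (entries : List (String × (List (String × List String)))) (attribute_ : String) :
    (pvOcc entries attribute_).map Prod.fst = pvPreKeys entries attribute_ := by
  simp [pvOcc, pvPreKeys, List.map_flatMap, List.map_map, Function.comp_def]

theorem pvDns_append (p : List (String × String)) (u dn v : String) :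
    pvDns (p ++ [(u, dn)]) v = pvDns p v ++ if u == v then [dn] else [] := by
  by_cases h : u = v
  · subst h; simp [pvDns, List.filter_append]
  · simp [pvDns, List.filter_append, h]

theorem pvCnt_append (p : List (String × String)) (u dn v : String) :
    pvCnt (p ++ [(u, dn)]) v = pvCnt p v + if u = v then 1 else 0 := by
  by_cases h : u = v
  · subst h; simp [pvCnt]
  · simp [pvCnt, h]

theorem pvDns_length (p : List (String × String)) (u : String) :
    (pvDns p u).length = pvCnt p u := by
  simp only [pvDns, pvCnt, List.count_eq_countP, List.countP_map, List.length_map,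
    Function.comp_def]
  exact Eq.symm List.countP_eq_length_filter

-- one right-step of the canonical duplicates list
theorem pvDups_append (p : List (String × String)) (u dn : String) :
    pvDups (p ++ [(u, dn)]) =
      (pvDups p).map (fun e => if e.1 = u then (e.1, e.2 ++ [dn]) else e) ++
      (if pvCnt p u = 1 then [(u, pvDns p u ++ [dn])] else []) := by
  have hmapfst : (p ++ [(u, dn)]).map Prod.fst = p.map Prod.fst ++ [u] := by simp
  simp only [pvDups, pvSecondOrder, hmapfst, PySem.List.enumerate_append, List.filter_append,
    List.map_append]
  congr 1
  · -- old indices: the slice and the filter test are unchanged, only the values grow at key u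
    rw [List.filter_congr (q := fun ju =>
        PySem.List.count (PySem.List.slice (p.map Prod.fst) none (some (ju.1 + 1))) ju.2 == 2)]
    · simp only [List.map_map]
      refine List.map_congr_left ?_
      intro ju _
      simp only [Function.comp_def]
      by_cases h : ju.2 = u
      · simp [h, pvDns_append]
      · simp only [h, if_false]
        have hb : (u == ju.2) = false := by simp [Ne.symm h]
        rw [pvDns_append, hb]
        simp
    · intro ju hm
      rcases (PySem.List.mem_enumerate_iff _ _ _).1 hm with ⟨k, hk, rfl⟩
      have h0 : (0 : Int) ≤ 0 + (k : Int) + 1 := by omega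
      rw [PySem.List.slice_to _ h0, PySem.List.slice_to _ h0]
      have ht : ((0 : Int) + (k : Int) + 1).toNat = k + 1 := by omega
      rw [ht, List.take_append_of_le_length (by omega)]
  · -- the new index: kept iff the code's count reaches exactly 2 here
    have hs : PySem.List.enumerate [u] (0 + (p.map Prod.fst).length) =
        [((0 + (p.map Prod.fst).length : Int), u)] := by
      simp [PySem.List.enumerate]
    rw [hs]
    have h0 : (0 : Int) ≤ 0 + ((p.map Prod.fst).length : Int) + 1 := by omega
    have ht : ((0 : Int) + ((p.map Prod.fst).length : Int) + 1).toNat = (p.map Prod.fst).length + 1 := by omega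
    simp only [List.filter_cons, List.filter_nil, PySem.List.slice_to _ h0, ht]
    rw [List.take_of_length_le (by simp)]
    rw [PySem.List.count_eq]
    have hc : List.count u (p.map Prod.fst ++ [u]) = pvCnt p u + 1 := by
      simp [pvCnt, List.count_append]
    rw [hc]
    by_cases h : pvCnt p u = 1
    · have hb : (pvCnt p u + 1 == 2) = true := by simp [h]
      simp only [if_true, h]
      have h2 := pvDns_append p u dn u
      simp only [pvDns] at h2
      simp [pvDns]
    · have hb : (pvCnt p u + 1 == 2) = false := by simp; omega
      simp [hb, h]

theorem pvDups_nil : pvDups [] = [] := rfl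

theorem pvCnt_nil (v : String) : pvCnt [] v = 0 := rfl

-- the map in pvDups_append only changes values, never keys
theorem pvDups_map_fst (p : List (String × String)) (u dn : String) :
    ((pvDups p).map (fun e => if e.1 = u then (e.1, e.2 ++ [dn]) else e)).map Prod.fst
      = (pvDups p).map Prod.fst := by
  rw [List.map_map]
  refine List.map_congr_left ?_
  intro e _
  by_cases h : e.1 = u <;> simp [h]

-- a key is in pvDups p iff its code occurs at least twice
theorem pvDups_keys (p : List (String × String)) :
    ∀ v, v ∈ (pvDups p).map Prod.fst ↔ 2 ≤ pvCnt p v := by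
  induction p using List.reverseRecOn with
  | nil => intro v; simp [pvDups_nil, pvCnt_nil]
  | append_singleton p q ih =>
    obtain ⟨u, dn⟩ := q
    intro v
    rw [pvDups_append, List.map_append, List.mem_append, pvDups_map_fst, pvCnt_append, ih]
    by_cases h : u = v
    · subst h
      by_cases h1 : pvCnt p u = 1
      · simp [h1]
      · simp [h1]; omega
    · by_cases h1 : pvCnt p u = 1 <;> simp [h1, h, Ne.symm h]

theorem pvDups_keys_nodup (p : List (String × String)) :
    ((pvDups p).map Prod.fst).Nodup := by
  induction p using List.reverseRecOn with
  | nil => simp [pvDups_nil]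
  | append_singleton p q ih =>
    obtain ⟨u, dn⟩ := q
    rw [pvDups_append, List.map_append, pvDups_map_fst]
    by_cases h1 : pvCnt p u = 1
    · simp only [h1, if_true, List.map_cons, List.map_nil]
      refine List.Nodup.append ih (List.nodup_singleton u) ?_
      intro v hv hv'
      simp at hv'
      subst hv'
      have := (pvDups_keys p v).1 hv
      omega
    · simpa [h1] using ih

-- the entry stored for a duplicated code is its full dn list
theorem pvDups_mem (p : List (String × String)) :
    ∀ v, 2 ≤ pvCnt p v → (v, pvDns p v) ∈ pvDups p := by
  induction p using List.reverseRecOn with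
  | nil => intro v hv; rw [pvCnt_nil] at hv; omega
  | append_singleton p q ih =>
    obtain ⟨u, dn⟩ := q
    intro v hv
    rw [pvCnt_append] at hv
    rw [pvDups_append, List.mem_append, pvDns_append]
    by_cases h : u = v
    · subst h
      rw [if_pos rfl] at hv
      have hbu : (u == u) = true := by simp
      rw [hbu, if_pos rfl]
      by_cases h1 : pvCnt p u = 1
      · right; simp [h1]
      · left
        have h2 : 2 ≤ pvCnt p u := by omega
        have hm := List.mem_map_of_mem (f := fun e => if e.1 = u then (e.1, e.2 ++ [dn]) else e) (ih u h2)
        simpa using hm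
    · rw [if_neg h] at hv
      have hb : (u == v) = false := by simp [h]
      rw [hb, if_neg (by simp)]
      left
      have hv' : 2 ≤ pvCnt p v := by omega
      have hm := List.mem_map_of_mem (f := fun e => if e.1 = u then (e.1, e.2 ++ [dn]) else e) (ih v hv')
      simpa [Ne.symm h] using hm

-- lookup in the canonical duplicates dict
theorem pvDups_get? (p : List (String × String)) (v : String) :
    (PySem.Dict.mk (pvDups p)).get? v = if 2 ≤ pvCnt p v then some (pvDns p v) else none := by
  by_cases h : 2 ≤ pvCnt p v
  · rw [if_pos h]
    exact PySem.Dict.get?_of_mem_items _ (pvDups_mem p v h) (pvDups_keys_nodup p)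
  · rw [if_neg h]
    rw [PySem.Dict.get?_eq_none_iff_not_mem_keys]
    intro hv
    exact h ((pvDups_keys p v).1 hv)

-- if a code never occurs twice, the value-update map of pvDups_append is the identity
theorem pvDups_map_id (p : List (String × String)) (u dn : String) (h : ¬ 2 ≤ pvCnt p u) :
    (pvDups p).map (fun e => if e.1 = u then (e.1, e.2 ++ [dn]) else e) = pvDups p := by
  have hcongr : ∀ e ∈ pvDups p, (if e.1 = u then (e.1, e.2 ++ [dn]) else e) = id e := by
    intro e he
    have hne : e.1 ≠ u := by
      intro hh
      have : e.1 ∈ (pvDups p).map Prod.fst := List.mem_map_of_mem he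
      rw [pvDups_keys] at this
      rw [hh] at this
      exact h this
    simp [hne]
  rw [List.map_congr_left hcongr, List.map_id]

-- the main invariant: folding A's step over the remaining occurrences from canonical states
theorem pvMain (r : List (String × String)) :
    ∀ (p : List (String × String)) (uniq : PySem.Dict String String),
      (∀ v, uniq.get? v = (pvDns p v).head?) →
      ((r.foldl pvStep (uniq, PySem.Dict.mk (pvDups p))).2).items = pvDups (p ++ r) := by
  induction r with
  | nil => intro p uniq _; simp
  | cons q r ih =>
    obtain ⟨u, dn⟩ := q
    intro p uniq h1
    rw [List.foldl_cons]
    have happ : p ++ (u, dn) :: r = (p ++ [(u, dn)]) ++ r := by simp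
    rw [happ]
    cases hd : (pvDns p u).head? with
    | none =>
      have hdnil : pvDns p u = [] := List.head?_eq_none_iff.1 hd
      have hcnt : pvCnt p u = 0 := by
        have := pvDns_length p u
        rw [hdnil] at this
        simpa using this.symm
      have hdups : pvDups (p ++ [(u, dn)]) = pvDups p := by
        rw [pvDups_append, pvDups_map_id p u dn (by omega), if_neg (by omega)]
        simp
      have hstep : pvStep (uniq, PySem.Dict.mk (pvDups p)) (u, dn) =
          (uniq.insert u dn, PySem.Dict.mk (pvDups (p ++ [(u, dn)]))) := by
        simp only [pvStep, h1 u, hd, hdups]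
      rw [hstep]
      refine ih (p ++ [(u, dn)]) (uniq.insert u dn) ?_
      intro v
      rw [PySem.Dict.get?_insert, pvDns_append]
      by_cases hv : v = u
      · subst hv; simp [hdnil]
      · have hb : (u == v) = false := by simp [Ne.symm hv]
        simp [hv, hb, h1 v]
    | some first =>
      have hne : pvDns p u ≠ [] := by intro hh; rw [hh] at hd; cases hd
      have hc1 : 1 ≤ pvCnt p u := by
        have hl := pvDns_length p u
        cases hpd : pvDns p u with
        | nil => exact absurd hpd hne
        | cons a t => rw [hpd] at hl; simp at hl; omega
      -- in both remaining cases the duplicates dict becomes mk (pvDups (p ++ [(u, dn)]))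
      have huniq' : ∀ v, uniq.get? v = (pvDns (p ++ [(u, dn)]) v).head? := by
        intro v
        rw [pvDns_append]
        by_cases hv : u = v
        · subst hv
          have hb : (u == u) = true := by simp
          rw [hb, List.head?_append, hd, h1 u, hd]
          rfl
        · have hb : (u == v) = false := by simp [hv]
          simp [hb, h1 v]
      by_cases h2 : 2 ≤ pvCnt p u
      · have hget : (PySem.Dict.mk (pvDups p)).get? u = some (pvDns p u) := by
          rw [pvDups_get?, if_pos h2]
        have hcontains : (PySem.Dict.mk (pvDups p)).contains u = true := by
          rw [PySem.Dict.contains_eq_isSome_get?, hget]; rfl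
        have hstep : pvStep (uniq, PySem.Dict.mk (pvDups p)) (u, dn) =
            (uniq, PySem.Dict.mk (pvDups (p ++ [(u, dn)]))) := by
          simp only [pvStep, h1 u, hd, hget, if_neg hne]
          congr 1
          apply PySem.Dict.ext
          rw [PySem.Dict.items_insert_of_contains _ _ hcontains]
          have hitems : (PySem.Dict.mk (pvDups p)).items = pvDups p := rfl
          rw [hitems, pvDups_append, if_neg (by omega), List.append_nil]
          refine List.map_congr_left ?_
          intro e he
          by_cases hu : e.1 = u
          · have hb : (e.1 == u) = true := by simp [hu]
            have he2 : e.2 = pvDns p u := by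
              have hg := PySem.Dict.get?_of_mem_items (PySem.Dict.mk (pvDups p))
                (k := e.1) (v := e.2) (by exact he) (pvDups_keys_nodup p)
              rw [hu, hget] at hg
              exact (Option.some_inj.1 hg).symm
            simp [hu, he2]
          · have hb : (e.1 == u) = false := by simp [hu]
            simp [hb, hu]
        rw [hstep]
        exact ih (p ++ [(u, dn)]) uniq huniq'
      · have hcu : pvCnt p u = 1 := by omega
        have hget : (PySem.Dict.mk (pvDups p)).get? u = none := by
          rw [pvDups_get?, if_neg h2]
        have hcontains : (PySem.Dict.mk (pvDups p)).contains u = false := by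
          rw [PySem.Dict.contains_eq_isSome_get?, hget]; rfl
        have hfirst : pvDns p u = [first] := by
          have hl := pvDns_length p u
          cases hpd : pvDns p u with
          | nil => exact absurd hpd hne
          | cons a t =>
            rw [hpd] at hl hd
            rw [hcu] at hl
            simp at hl hd
            rw [hd, hl]
        have hstep : pvStep (uniq, PySem.Dict.mk (pvDups p)) (u, dn) =
            (uniq, PySem.Dict.mk (pvDups (p ++ [(u, dn)]))) := by
          simp only [pvStep, h1 u, hd, hget]
          congr 1
          apply PySem.Dict.ext
          rw [PySem.Dict.items_insert_of_not_contains _ _ hcontains]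
          have hitems : (PySem.Dict.mk (pvDups p)).items = pvDups p := rfl
          rw [hitems, pvDups_append, pvDups_map_id p u dn h2, if_pos hcu, hfirst]
        rw [hstep]
        exact ih (p ++ [(u, dn)]) uniq huniq'

-- A's nested entry/code loops are pvStep folded over the flattened occurrence list
theorem pvFlatten (entries : List (String × (List (String × List String)))) (attribute_ : String)
    (st : PySem.Dict String String × PySem.Dict String (List String)) :
    entries.foldl
      (fun st i =>
        match PySem.Dict.get? (PySem.Dict.mk i.2) attribute_ with
        | none => st
        | some ucodes =>
          if ucodes = [] then st
          else ucodes.foldl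
            (fun st ucode0 =>
              let ucode := PySem.Str.lower ucode0
              match PySem.Dict.get? st.1 ucode with
              | none => (st.1.insert ucode i.1, st.2)
              | some first =>
                let values :=
                  match PySem.Dict.get? st.2 ucode with
                  | some v => if v = [] then [first] else v
                  | none => [first]
                (st.1, st.2.insert ucode (values ++ [i.1]))) st)
      st
    = (pvOcc entries attribute_).foldl pvStep st := by
  induction entries generalizing st with
  | nil => simp [pvOcc]
  | cons i entries ih =>
    rw [List.foldl_cons, ih]
    simp only [pvOcc, List.flatMap_cons, List.foldl_append]
    congr 1
    cases hg : PySem.Dict.get? (PySem.Dict.mk i.2) attribute_ with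
    | none => simp
    | some ucodes =>
      simp only [Option.getD_some]
      by_cases he : ucodes = []
      · subst he; simp
      · rw [if_neg he, List.foldl_map]
        rfl

-- B's nested entry/code loops are its grouping step folded over the same occurrence list
theorem pvFlattenB (entries : List (String × (List (String × List String)))) (attribute_ : String)
    (d : PySem.Dict String (List String)) :
    entries.foldl
      (fun d i =>
        ((PySem.Dict.get? (PySem.Dict.mk i.2) attribute_).getD []).foldl
          (fun d u => d.modify (PySem.Str.lower u) [] (fun v => v ++ [i.1])) d)
      d
    = (pvOcc entries attribute_).foldl (fun d q => d.modify q.1 [] (fun v => v ++ [q.2])) d := by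
  induction entries generalizing d with
  | nil => simp [pvOcc]
  | cons i entries ih =>
    rw [List.foldl_cons, ih]
    simp only [pvOcc, List.flatMap_cons, List.foldl_append]
    congr 1
    rw [List.foldl_map]

-- B's grouping dict, characterised: keys in first-occurrence order, values the full dn lists
theorem pvGroup_items (occ : List (String × String)) :
    (occ.foldl (fun d q => d.modify q.1 [] (fun v => v ++ [q.2])) PySem.Dict.empty).items
      = (PySem.Set.ofList (occ.map Prod.fst)).map (fun u => (u, pvDns occ u)) := by
  have hkeys : (occ.foldl (fun d q => d.modify q.1 [] (fun v => v ++ [q.2])) PySem.Dict.empty).keys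
      = PySem.Set.ofList (occ.map Prod.fst) := by
    rw [PySem.Dict.keys_foldl_modify_key (key := Prod.fst)]
    simp [PySem.Dict.keys_empty, PySem.Set.update_nil_left]
  have hnodup : (occ.foldl (fun d q => d.modify q.1 [] (fun v => v ++ [q.2])) PySem.Dict.empty).keys.Nodup := by
    rw [hkeys]; exact PySem.Set.nodup_ofList _
  rw [PySem.Dict.items_eq_map_keys _ hnodup [], hkeys]
  refine List.map_congr_left ?_
  intro u _
  rw [PySem.Dict.getD_foldl_modify_append]
  simp [PySem.Dict.getD_empty, pvDns]

-- ===== VERDICT (by name: the statement is the Claim_ definition above) =====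
theorem get_duplicates_by_attribute_spec : Claim_equal_get_duplicates_by_attribute := by
  intro entries attribute_ _ hpre
  unfold Spec_get_duplicates_by_attribute get_duplicates_by_attribute get_duplicates_by_attribute_alt
  rw [pvFlatten, pvFlattenB]
  have hA : ((pvOcc entries attribute_).foldl pvStep
      (PySem.Dict.empty, PySem.Dict.empty)).2.items = pvDups (pvOcc entries attribute_) := by
    have h := pvMain (pvOcc entries attribute_) [] PySem.Dict.empty
      (by intro v; simp [pvDns, PySem.Dict.get?_empty])
    simpa [pvDups, pvSecondOrder, pvDns] using h
  rw [hA, pvGroup_items]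
  rw [List.filter_map]
  have hfc : ((PySem.Set.ofList ((pvOcc entries attribute_).map Prod.fst)).filter
        ((fun kv => decide (1 < kv.2.length)) ∘ fun u => (u, pvDns (pvOcc entries attribute_) u)))
      = ((PySem.Set.ofList (pvPreKeys entries attribute_)).filter
        (fun u => decide (2 ≤ (pvPreKeys entries attribute_).count u))) := by
    rw [pvKeys_occ]
    refine List.filter_congr ?_
    intro u _
    simp only [Function.comp_def]
    rw [show (pvDns (pvOcc entries attribute_) u).length = pvCnt (pvOcc entries attribute_) u from
      pvDns_length _ _]
    simp only [pvCnt, pvKeys_occ]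
    rfl
  rw [hfc, hpre]
  unfold pvDups
  rw [pvKeys_occ]
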